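-- pv_equiv track=rewrite | github.com/sschott20/typemem | typemem/baselines.py | _budget_join
-- ===== SOURCE A (Python) =====
-- from typing import Iterable
--
-- def _budget_join(texts: Iterable[str], token_budget: int) -> str:
--     """Join texts until the approximate token budget is exhausted."""
--     lines: list[str] = []
--     budget_left = token_budget
--     for text in texts:
--         cost = len(text) // 4
--         if cost > budget_left:
--             break
--         lines.append(text)
--         budget_left -= cost
--     return "\n".join(lines)
-- ===== SOURCE B (Python) =====
-- from bisect import bisect_right
--
-- def _budget_join(texts, token_budget):
--     texts = list(texts)
--     prefix = []
--     total = 0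
--     for t in texts:
--         total += len(t) // 4
--         prefix.append(total)
--     # costs are non-negative, so prefix is monotone: binary search for the cut
--     k = bisect_right(prefix, token_budget)
--     return "\n".join(texts[:k])
-- ===== Notes on version B (the rewrite author's own statement) =====
-- stated objective: alternative
-- what changed: Locates the cut point by binary search (bisect_right) over a precomputed monotone prefix-sum array of per-text costs instead of A's budget-decrementing loop with early break, then slices and joins.
import Mathlib
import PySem

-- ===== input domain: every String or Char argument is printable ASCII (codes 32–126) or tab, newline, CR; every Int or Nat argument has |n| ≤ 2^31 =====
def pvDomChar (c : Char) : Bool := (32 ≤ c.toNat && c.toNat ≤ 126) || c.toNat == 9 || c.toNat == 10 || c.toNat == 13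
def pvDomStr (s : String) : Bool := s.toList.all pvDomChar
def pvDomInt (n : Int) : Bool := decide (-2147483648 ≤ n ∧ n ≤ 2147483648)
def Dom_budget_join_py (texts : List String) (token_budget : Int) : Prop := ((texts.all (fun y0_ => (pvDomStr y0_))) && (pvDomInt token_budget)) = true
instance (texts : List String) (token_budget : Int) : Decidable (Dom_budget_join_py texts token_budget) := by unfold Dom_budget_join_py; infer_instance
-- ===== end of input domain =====

-- B replaces A's budget-decrementing loop (early break) by building the monotone
-- prefix-sum array of per-text costs and binary-searching (bisect_right) for the cut.

-- ===== PORT A =====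
def budgetJoinLoop (texts : List String) (budget_left : Int) (lines : List String) : List String :=
  match texts with
  | [] => lines
  | text :: rest =>
      let cost := PySem.Int.floordiv (PySem.Str.len text) 4
      if cost > budget_left then lines
      else budgetJoinLoop rest (budget_left - cost) (lines ++ [text])

def budget_join_py (texts : List String) (token_budget : Int) : String :=
  PySem.Str.join "\n" (budgetJoinLoop texts token_budget [])

-- ===== PORT B =====
-- the prefix-building loop of Source B (total accumulator, append running sum)
def pvPrefixLoop (texts : List String) (total : Int) : List Int :=
  match texts with
  | [] => []
  | t :: ts =>
      let total' := total + PySem.Int.floordiv (PySem.Str.len t) 4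
      total' :: pvPrefixLoop ts total'

-- bisect.bisect_right(a, x): standard binary search; a[mid] is always in range
-- (0 ≤ mid < a.length whenever lo < hi ≤ a.length), so getD is exact here.
def pvBisectRight (a : List Int) (x : Int) (lo hi : Nat) : Nat :=
  if lo < hi then
    let mid := (lo + hi) / 2
    if x < a.getD mid 0 then pvBisectRight a x lo mid
    else pvBisectRight a x (mid + 1) hi
  else lo
termination_by hi - lo
decreasing_by all_goals omega

def budget_join_py_alt (texts : List String) (token_budget : Int) : String :=
  let pre := pvPrefixLoop texts 0
  let k := pvBisectRight pre token_budget 0 pre.length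
  PySem.Str.join "\n" (texts.take k)

-- ===== PRECONDITION & SPEC =====
def Spec_budget_join_py (texts : List String) (token_budget : Int) (out : String) : Prop := out = budget_join_py_alt texts token_budget
instance (texts : List String) (token_budget : Int) (out : String) : Decidable (Spec_budget_join_py texts token_budget out) := by unfold Spec_budget_join_py; infer_instance

-- ===== CLAIM (what is proved, stated in full; the proofs are below) =====
def Claim_equal_budget_join_py : Prop := ∀ (texts : List String) (token_budget : Int), Dom_budget_join_py texts token_budget → Spec_budget_join_py texts token_budget (budget_join_py texts token_budget)

-- ===== LEMMAS AND PROOFS =====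

-- cost of a text is non-negative
lemma cost_nonneg (t : String) : 0 ≤ PySem.Int.floordiv (PySem.Str.len t) 4 := by
  have h : 0 ≤ PySem.Str.len t := by simp [PySem.Str.len]
  simp only [PySem.Int.floordiv]
  exact Int.fdiv_nonneg h (by omega)

-- every element of pvPrefixLoop texts total is ≥ total
lemma pvPrefixLoop_ge (texts : List String) (total : Int) :
    ∀ y ∈ pvPrefixLoop texts total, total ≤ y := by
  induction texts generalizing total with
  | nil => simp [pvPrefixLoop]
  | cons t ts ih =>
      intro y hy
      simp only [pvPrefixLoop, List.mem_cons] at hy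
      have hc := cost_nonneg t
      rcases hy with rfl | hy
      · omega
      · have := ih (total + PySem.Int.floordiv (PySem.Str.len t) 4) y hy
        omega

lemma pvPrefixLoop_sorted (texts : List String) (total : Int) :
    (pvPrefixLoop texts total).Pairwise (· ≤ ·) := by
  induction texts generalizing total with
  | nil => simp [pvPrefixLoop]
  | cons t ts ih =>
      simp only [pvPrefixLoop, List.pairwise_cons]
      exact ⟨fun y hy => le_trans (by have := cost_nonneg t; omega) (pvPrefixLoop_ge ts _ y hy), ih _⟩

-- monotone-index form of sortedness
lemma sorted_getD_mono (p : List Int) (hs : p.Pairwise (· ≤ ·)) (i j : Nat)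
    (hij : i ≤ j) (hj : j < p.length) : p.getD i 0 ≤ p.getD j 0 := by
  rcases eq_or_lt_of_le hij with rfl | hlt
  · exact le_refl _
  · have hi : i < p.length := lt_trans hlt hj
    have := List.Pairwise.rel_get_of_lt hs (a := ⟨i, hi⟩) (b := ⟨j, hj⟩) hlt
    simpa [List.getD_eq_getElem?_getD, List.getElem?_eq_getElem, hi, hj] using this

-- length of a takeWhile prefix, characterized pointwise
lemma takeWhile_length_eq {α : Type} (q : α → Bool) (p : List α) (n : Nat)
    (hn : n ≤ p.length)
    (h1 : ∀ i (h : i < n), q (p[i]'(lt_of_lt_of_le h hn)) = true)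
    (h2 : ∀ (h : n < p.length), q (p[n]'h) = false) :
    (p.takeWhile q).length = n := by
  induction p generalizing n with
  | nil => simp only [List.length_nil, Nat.le_zero] at hn; simp [hn]
  | cons a ps ih =>
      cases n with
      | zero =>
          have := h2 (by simp)
          simp only [List.getElem_cons_zero] at this
          simp [this]
      | succ n =>
          have ha := h1 0 (Nat.succ_pos n)
          simp only [List.getElem_cons_zero] at ha
          simp only [List.takeWhile_cons, ha, if_true, List.length_cons]
          rw [ih n (by simpa using hn)
            (fun i h => by simpa using h1 (i + 1) (by omega))
            (fun h => by simpa using h2 (by simpa using h))]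

-- bisect_right on a sorted list returns the length of the ≤-x prefix (fuel induction)
lemma pvBisectRight_spec_aux (p : List Int) (x : Int) (hs : p.Pairwise (· ≤ ·)) (n : Nat) :
    ∀ (lo hi : Nat), hi - lo ≤ n → hi ≤ p.length → lo ≤ hi →
    (∀ i, i < lo → p.getD i 0 ≤ x) →
    (∀ i, hi ≤ i → i < p.length → x < p.getD i 0) →
    pvBisectRight p x lo hi = (p.takeWhile (fun y => decide (y ≤ x))).length := by
  induction n with
  | zero =>
      intro lo hi hfuel hhi hlohi hlo hgt
      have : lo = hi := by omega
      subst this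
      rw [pvBisectRight, if_neg (by omega)]
      refine (takeWhile_length_eq _ p lo hhi ?_ ?_).symm
      · intro i h
        have := hlo i h
        simpa [List.getD_eq_getElem?_getD, List.getElem?_eq_getElem, lt_of_lt_of_le h hhi] using this
      · intro h
        have := hgt lo (le_refl _) h
        simp only [List.getD_eq_getElem?_getD, List.getElem?_eq_getElem, h] at this
        simpa using not_le.mpr this
  | succ n ih =>
      intro lo hi hfuel hhi hlohi hlo hgt
      by_cases h : lo < hi
      · rw [pvBisectRight, if_pos h]
        show (if x < p.getD ((lo + hi) / 2) 0 then pvBisectRight p x lo ((lo + hi) / 2)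
              else pvBisectRight p x ((lo + hi) / 2 + 1) hi) = _
        by_cases hxm : x < p.getD ((lo + hi) / 2) 0
        · rw [if_pos hxm]
          apply ih lo ((lo + hi) / 2) (by omega) (by omega) (by omega) hlo
          intro i hi1 hi2
          exact lt_of_lt_of_le hxm (sorted_getD_mono p hs ((lo + hi) / 2) i hi1 hi2)
        · rw [if_neg hxm]
          apply ih ((lo + hi) / 2 + 1) hi (by omega) hhi (by omega) _ hgt
          intro i hi1
          rcases Nat.lt_or_ge i lo with h' | h'
          · exact hlo i h'
          · calc p.getD i 0 ≤ p.getD ((lo + hi) / 2) 0 :=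
                  sorted_getD_mono p hs i ((lo + hi) / 2) (by omega) (by omega)
              _ ≤ x := not_lt.mp hxm
      · rw [pvBisectRight, if_neg h]
        have : lo = hi := by omega
        subst this
        refine (takeWhile_length_eq _ p lo hhi ?_ ?_).symm
        · intro i hlt
          have := hlo i hlt
          simpa [List.getD_eq_getElem?_getD, List.getElem?_eq_getElem, lt_of_lt_of_le hlt hhi] using this
        · intro hlt
          have := hgt lo (le_refl _) hlt
          simp only [List.getD_eq_getElem?_getD, List.getElem?_eq_getElem, hlt] at this
          simpa using not_le.mpr this

lemma pvBisectRight_spec (p : List Int) (x : Int) (hs : p.Pairwise (· ≤ ·)) :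
    pvBisectRight p x 0 p.length = (p.takeWhile (fun y => decide (y ≤ x))).length :=
  pvBisectRight_spec_aux p x hs p.length 0 p.length (by omega) (le_refl _) (Nat.zero_le _)
    (by omega) (by omega)

-- A's loop, related to the prefix sums: it collects texts while the running sum stays ≤ tb
lemma budgetJoinLoop_eq_take (texts : List String) (tb acc b : Int) (lines : List String)
    (h : acc + b = tb) :
    budgetJoinLoop texts b lines =
      lines ++ texts.take (((pvPrefixLoop texts acc).takeWhile (fun y => decide (y ≤ tb))).length) := by
  induction texts generalizing acc b lines with
  | nil => simp [budgetJoinLoop, pvPrefixLoop]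
  | cons t ts ih =>
      simp only [budgetJoinLoop, pvPrefixLoop, List.takeWhile_cons, decide_eq_true_eq]
      by_cases hc : PySem.Int.floordiv (PySem.Str.len t) 4 > b
      · rw [if_pos hc, if_neg (by omega)]
        simp
      · rw [if_neg hc, if_pos (by omega),
            ih (acc + PySem.Int.floordiv (PySem.Str.len t) 4)
               (b - PySem.Int.floordiv (PySem.Str.len t) 4) (lines ++ [t]) (by omega)]
        simp [List.take_succ_cons]

-- ===== VERDICT (by name: the statement is the Claim_ definition above) =====
theorem budget_join_py_spec : Claim_equal_budget_join_py := by
  intro texts token_budget _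
  unfold Spec_budget_join_py
  simp only [budget_join_py, budget_join_py_alt]
  rw [budgetJoinLoop_eq_take texts token_budget 0 token_budget [] (by omega),
      pvBisectRight_spec (pvPrefixLoop texts 0) token_budget (pvPrefixLoop_sorted texts 0)]
  simp
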